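-- pv_equiv track=rewrite | github.com/lcho3878/Algorithm | 프로그래머스/unrated/120956. 옹알이 （1）/옹알이 （1）.py | solution
-- ===== SOURCE A (Python) =====
-- def solution(babbling):
--     answer = 0
--     pronun = ["aya", "ye", "woo", "ma"]
--     for word in babbling:
--         temp = ""
--         for char in word:
--             temp += char
--             if pronun.__contains__(temp):
--                 temp = ""
--         if temp == "":
--             answer += 1
--     return answer
-- ===== SOURCE B (Python) =====
-- def solution(babbling):
--     syllables = ("aya", "ye", "woo", "ma")
--
--     def can(w):
--         if w == "":
--             return True
--         return any(w.startswith(s) and can(w[len(s):]) for s in syllables)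
--
--     return sum(1 for w in babbling if can(w))
-- ===== Notes on version B (the rewrite author's own statement) =====
-- stated objective: idiomatic
-- what changed: Replaced the explicit char-by-char accumulator scan with a recursive prefix-stripping decider (can: strip one allowed syllable and recurse), counting words via sum over a generator; correct because the syllable set is prefix-free.
import Mathlib
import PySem

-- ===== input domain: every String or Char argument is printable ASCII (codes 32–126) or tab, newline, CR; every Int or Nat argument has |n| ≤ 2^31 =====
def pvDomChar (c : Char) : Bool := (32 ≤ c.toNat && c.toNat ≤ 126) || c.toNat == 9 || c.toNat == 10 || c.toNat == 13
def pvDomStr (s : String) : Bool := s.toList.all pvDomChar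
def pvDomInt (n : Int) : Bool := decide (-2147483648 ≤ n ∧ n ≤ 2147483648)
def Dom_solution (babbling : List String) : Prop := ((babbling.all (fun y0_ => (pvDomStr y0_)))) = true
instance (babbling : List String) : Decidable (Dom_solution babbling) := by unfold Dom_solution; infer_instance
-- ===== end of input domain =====

-- B replaces A's char-by-char accumulator scan with a recursive prefix-stripping decider (idiomatic; same cost).

-- ===== PORT A =====
-- Python's pronun list, over List Char
def pronunL : List (List Char) := [['a','y','a'], ['y','e'], ['w','o','o'], ['m','a']]

-- A's inner loop: temp grows char by char, reset to "" whenever temp is in pronun; returns final temp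
def solLoopA (temp : List Char) : List Char → List Char
  | [] => temp
  | c :: cs =>
      if (temp ++ [c]) ∈ pronunL then solLoopA [] cs
      else solLoopA (temp ++ [c]) cs

def solution (babbling : List String) : Int :=
  babbling.foldl (fun answer word =>
    if solLoopA [] word.toList = [] then answer + 1 else answer) 0

-- ===== PORT B =====
-- Source B's can(w): empty word ok, else try stripping each allowed syllable (the `any` over the
-- literal 4-tuple is unrolled into the four disjuncts)
def canB : List Char → Bool
  | [] => true
  | c :: cs =>
      (List.isPrefixOf ['a','y','a'] (c :: cs) && canB (cs.drop 2)) ||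
      (List.isPrefixOf ['y','e'] (c :: cs) && canB (cs.drop 1)) ||
      (List.isPrefixOf ['w','o','o'] (c :: cs) && canB (cs.drop 2)) ||
      (List.isPrefixOf ['m','a'] (c :: cs) && canB (cs.drop 1))
  termination_by w => w.length
  decreasing_by all_goals (simp [List.length_drop]; try omega)

def solution_alt (babbling : List String) : Int :=
  (babbling.countP (fun w => canB w.toList) : Int)

-- ===== PRECONDITION & SPEC =====
def Spec_solution (babbling : List String) (out : Int) : Prop := out = solution_alt babbling
instance (babbling : List String) (out : Int) : Decidable (Spec_solution babbling out) := by unfold Spec_solution; infer_instance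

-- ===== CLAIM (what is proved, stated in full; the proofs are below) =====
def Claim_equal_solution : Prop := ∀ (babbling : List String), Dom_solution babbling → Spec_solution babbling (solution babbling)

-- ===== LEMMAS AND PROOFS =====

-- proper prefixes of the syllables (the "live" values A's temp can take)
def PP : List (List Char) := [[], ['a'], ['a','y'], ['y'], ['w'], ['w','o'], ['m']]

-- once temp is not a prefix of any syllable, the loop never resets
theorem solLoopA_stuck (w : List Char) : ∀ temp : List Char,
    (∀ s ∈ pronunL, ¬ temp <+: s) → solLoopA temp w = temp ++ w := by
  induction w with
  | nil => intro temp _; simp [solLoopA]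
  | cons c cs ih =>
      intro temp h
      have hnp : ∀ s ∈ pronunL, ¬ (temp ++ [c]) <+: s := fun s hs hp =>
        h s hs ((List.prefix_append temp [c]).trans hp)
      have hnm : (temp ++ [c]) ∉ pronunL := fun hm =>
        h _ hm (List.prefix_append temp [c])
      simp only [solLoopA, if_neg hnm]
      rw [ih _ hnp, List.append_assoc]
      rfl

-- stripping a leading syllable preserves canB
theorem canB_strip_aya (r : List Char) : canB ('a'::'y'::'a'::r) = canB r := by
  simp [canB, List.isPrefixOf]

theorem canB_strip_ye (r : List Char) : canB ('y'::'e'::r) = canB r := by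
  simp [canB, List.isPrefixOf]

theorem canB_strip_woo (r : List Char) : canB ('w'::'o'::'o'::r) = canB r := by
  simp [canB, List.isPrefixOf]

theorem canB_strip_ma (r : List Char) : canB ('m'::'a'::r) = canB r := by
  simp [canB, List.isPrefixOf]

-- main invariant: for temp a proper prefix of a syllable, the loop empties iff temp ++ w is decodable
theorem solLoopA_canB (w : List Char) : ∀ temp : List Char, temp ∈ PP →
    (solLoopA temp w = [] ↔ canB (temp ++ w) = true) := by
  induction w with
  | nil =>
      intro temp htemp
      fin_cases htemp <;> simp [solLoopA, canB]
  | cons c cs ih =>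
      intro temp htemp
      fin_cases htemp <;>
        simp only [solLoopA, List.cons_append, List.nil_append]
      · -- temp = []
        have hnm : ([c] : List Char) ∉ pronunL := by simp [pronunL]
        rw [if_neg hnm]
        by_cases ha : c = 'a'
        · subst ha; exact ih ['a'] (by simp [PP])
        · by_cases hy : c = 'y'
          · subst hy; exact ih ['y'] (by simp [PP])
          · by_cases hw : c = 'w'
            · subst hw; exact ih ['w'] (by simp [PP])
            · by_cases hm : c = 'm'
              · subst hm; exact ih ['m'] (by simp [PP])
              · rw [solLoopA_stuck cs [c]
                  (by simp [pronunL, List.cons_prefix_iff, Ne.symm ha, Ne.symm hy, Ne.symm hw, Ne.symm hm])]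
                simp [canB, List.isPrefixOf, Ne.symm ha, Ne.symm hy, Ne.symm hw, Ne.symm hm]
      · -- temp = ['a']
        have hnm : (['a', c] : List Char) ∉ pronunL := by simp [pronunL]
        rw [if_neg hnm]
        by_cases hy : c = 'y'
        · subst hy; exact ih ['a','y'] (by simp [PP])
        · rw [solLoopA_stuck cs ['a', c]
            (by simp [pronunL, List.cons_prefix_iff, Ne.symm hy])]
          simp [canB, List.isPrefixOf, Ne.symm hy]
      · -- temp = ['a','y']
        by_cases ha : c = 'a'
        · subst ha
          rw [if_pos (by simp [pronunL] : (['a','y','a'] : List Char) ∈ pronunL),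
              canB_strip_aya]
          exact ih [] (by simp [PP])
        · rw [if_neg (by simp [pronunL, ha] : (['a','y',c] : List Char) ∉ pronunL)]
          rw [solLoopA_stuck cs ['a','y',c]
            (by simp [pronunL, List.cons_prefix_iff, Ne.symm ha])]
          simp [canB, List.isPrefixOf, Ne.symm ha]
      · -- temp = ['y']
        by_cases he : c = 'e'
        · subst he
          rw [if_pos (by simp [pronunL] : (['y','e'] : List Char) ∈ pronunL), canB_strip_ye]
          exact ih [] (by simp [PP])
        · rw [if_neg (by simp [pronunL, he] : (['y',c] : List Char) ∉ pronunL)]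
          rw [solLoopA_stuck cs ['y',c]
            (by simp [pronunL, List.cons_prefix_iff, Ne.symm he])]
          simp [canB, List.isPrefixOf, Ne.symm he]
      · -- temp = ['w']
        have hnm : (['w', c] : List Char) ∉ pronunL := by simp [pronunL]
        rw [if_neg hnm]
        by_cases ho : c = 'o'
        · subst ho; exact ih ['w','o'] (by simp [PP])
        · rw [solLoopA_stuck cs ['w', c]
            (by simp [pronunL, List.cons_prefix_iff, Ne.symm ho])]
          simp [canB, List.isPrefixOf, Ne.symm ho]
      · -- temp = ['w','o']
        by_cases ho : c = 'o'
        · subst ho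
          rw [if_pos (by simp [pronunL] : (['w','o','o'] : List Char) ∈ pronunL),
              canB_strip_woo]
          exact ih [] (by simp [PP])
        · rw [if_neg (by simp [pronunL, ho] : (['w','o',c] : List Char) ∉ pronunL)]
          rw [solLoopA_stuck cs ['w','o',c]
            (by simp [pronunL, List.cons_prefix_iff, Ne.symm ho])]
          simp [canB, List.isPrefixOf, Ne.symm ho]
      · -- temp = ['m']
        by_cases ha : c = 'a'
        · subst ha
          rw [if_pos (by simp [pronunL] : (['m','a'] : List Char) ∈ pronunL), canB_strip_ma]
          exact ih [] (by simp [PP])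
        · rw [if_neg (by simp [pronunL, ha] : (['m',c] : List Char) ∉ pronunL)]
          rw [solLoopA_stuck cs ['m',c]
            (by simp [pronunL, List.cons_prefix_iff, Ne.symm ha])]
          simp [canB, List.isPrefixOf, Ne.symm ha]

-- per-word agreement
theorem word_agree (w : List Char) : (solLoopA [] w = []) ↔ canB w = true := by
  simpa using solLoopA_canB w [] (by simp [PP])

-- the fold with accumulator equals the accumulator plus the count
theorem fold_count (l : List String) : ∀ a : Int,
    l.foldl (fun answer word => if solLoopA [] word.toList = [] then answer + 1 else answer) a
      = a + (l.countP (fun w => canB w.toList) : Int) := by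
  induction l with
  | nil => intro a; simp
  | cons x xs ih =>
      intro a
      by_cases hx : canB x.toList = true
      · have hx' : solLoopA [] x.toList = [] := (word_agree x.toList).mpr hx
        simp [List.foldl, hx, hx', ih]
        ring
      · have hx' : ¬ solLoopA [] x.toList = [] := fun h => hx ((word_agree x.toList).mp h)
        simp [List.foldl, hx, hx', ih]

-- ===== VERDICT (by name: the statement is the Claim_ definition above) =====
theorem solution_spec : Claim_equal_solution := by
  intro babbling _
  unfold Spec_solution solution solution_alt
  simpa using fold_count babbling 0
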